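-- pv_equiv track=rewrite | github.com/radarlwd/read_bean_pie | app.py | parse_query_block
-- ===== SOURCE A (Python) =====
-- from typing import Any
--
-- def parse_query_block(raw_query: str, query_index: int) -> dict[str, Any]:
--     lines = raw_query.splitlines()
--     name = f"q{query_index}"
--     for_each: str | None = None
--     item_alias = "item"
--     for_mode = "combine"
--     body_start = 0
--
--     for idx, line in enumerate(lines):
--         stripped = line.strip()
--         if not stripped:
--             body_start = idx + 1
--             continue
--
--         if not stripped.startswith("-- @"):
--             body_start = idx
--             break
--
--         directive = stripped[4:].strip()
--         if directive.startswith("name "):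
--             value = directive[5:].strip()
--             if value:
--                 name = value
--         elif directive.startswith("for_each "):
--             value = directive[9:].strip()
--             if value:
--                 for_each = value
--         elif directive.startswith("item "):
--             value = directive[5:].strip()
--             if value:
--                 item_alias = value
--         elif directive.startswith("for_mode "):
--             value = directive[9:].strip().lower()
--             if value in {"combine", "split"}:
--                 for_mode = value
--         body_start = idx + 1
--
--     sql_text = "\n".join(lines[body_start:]).strip()
--     return {
--         "name": name,
--         "for_each": for_each,
--         "item_alias": item_alias,
--         "for_mode": for_mode,
--         "sql": sql_text,
--         "raw": raw_query,
--     }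
-- ===== SOURCE B (Python) =====
-- def _split_first_space(s):
--     for i, ch in enumerate(s):
--         if ch == " ":
--             return s[:i], s[i + 1:]
--     return s, ""
--
--
-- def parse_query_block(raw_query: str, query_index: int) -> dict:
--     lines = raw_query.splitlines()
--     body_start = next(
--         (i for i, line in enumerate(lines)
--          if line.strip() and not line.strip().startswith("-- @")),
--         len(lines),
--     )
--
--     name = f"q{query_index}"
--     for_each = None
--     item_alias = "item"
--     for_mode = "combine"
--     for line in lines[:body_start]:
--         key, rest = _split_first_space(line.strip()[4:].strip())
--         value = rest.strip()
--         if key == "name":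
--             if value:
--                 name = value
--         elif key == "for_each":
--             if value:
--                 for_each = value
--         elif key == "item":
--             if value:
--                 item_alias = value
--         elif key == "for_mode":
--             low = value.lower()
--             if low in ("combine", "split"):
--                 for_mode = low
--
--     sql = "\n".join(lines[body_start:]).strip()
--     return {
--         "name": name,
--         "for_each": for_each,
--         "item_alias": item_alias,
--         "for_mode": for_mode,
--         "sql": sql,
--         "raw": raw_query,
--     }
-- ===== Notes on version B (the rewrite author's own statement) =====
-- stated objective: alternative
-- what changed: B replaces A's single combined scan (directive parsing, blank-line bookkeeping and body_start tracking interleaved with break) by a boundary-first decomposition: it locates body_start as the first non-blank non-'-- @' line, then parses the header slice with a keyword dispatch that tokenizes each directive at its first space instead of testing fixed-width prefixes, then joins the body slice.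
import Mathlib
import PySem

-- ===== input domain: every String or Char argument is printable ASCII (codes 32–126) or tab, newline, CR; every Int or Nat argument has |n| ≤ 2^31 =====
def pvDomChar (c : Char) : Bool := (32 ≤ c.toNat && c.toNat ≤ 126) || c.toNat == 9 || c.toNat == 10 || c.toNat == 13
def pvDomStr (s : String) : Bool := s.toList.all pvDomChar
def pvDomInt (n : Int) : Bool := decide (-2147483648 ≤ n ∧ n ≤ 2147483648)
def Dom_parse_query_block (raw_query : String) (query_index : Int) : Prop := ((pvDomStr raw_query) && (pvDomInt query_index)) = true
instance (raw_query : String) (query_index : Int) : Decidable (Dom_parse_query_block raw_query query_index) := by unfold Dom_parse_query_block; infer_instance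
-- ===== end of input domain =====

-- B re-implements A by a different decomposition: it first finds body_start (first
-- non-blank, non-"-- @" line), then parses the header slice dispatching each directive
-- on its first-space-split keyword, then joins the body; return values are proved equal.

-- ===== PORT A =====
-- Shared record for the four header variables (name, for_each, item_alias, for_mode).
structure PQState where
  name : List Char
  for_each : Option (List Char)
  item_alias : List Char
  for_mode : List Char
deriving Repr, DecidableEq

-- the directive-parsing elif chain of A's loop body (argument is the stripped line)
def pqDirectiveA (stripped : List Char) (st : PQState) : PQState :=
  let directive := PySem.Chars.strip (PySem.Chars.slice stripped (some 4) none)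
  if PySem.Chars.startswith directive "name ".toList then
    let value := PySem.Chars.strip (PySem.Chars.slice directive (some 5) none)
    if value ≠ [] then { st with name := value } else st
  else if PySem.Chars.startswith directive "for_each ".toList then
    let value := PySem.Chars.strip (PySem.Chars.slice directive (some 9) none)
    if value ≠ [] then { st with for_each := some value } else st
  else if PySem.Chars.startswith directive "item ".toList then
    let value := PySem.Chars.strip (PySem.Chars.slice directive (some 5) none)
    if value ≠ [] then { st with item_alias := value } else st
  else if PySem.Chars.startswith directive "for_mode ".toList then
    let value := PySem.Chars.lower (PySem.Chars.strip (PySem.Chars.slice directive (some 9) none))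
    if value = "combine".toList ∨ value = "split".toList then { st with for_mode := value }
    else st
  else st

-- A's single for-loop: carries idx, the header state and body_start; `break` returns early
def pqLoopA : List (List Char) → Nat → PQState → Nat → PQState × Nat
  | [], _, st, bs => (st, bs)
  | l :: rest, idx, st, _bs =>
    let stripped := PySem.Chars.strip l
    if stripped = [] then pqLoopA rest (idx + 1) st (idx + 1)
    else if ¬ PySem.Chars.startswith stripped "-- @".toList then (st, idx)
    else pqLoopA rest (idx + 1) (pqDirectiveA stripped st) (idx + 1)

def parse_query_block (raw_query : String) (query_index : Int) : List (String × Option String) :=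
  let lines := PySem.Chars.splitlines raw_query.toList
  -- f"q{query_index}" as a char list: 'q' followed by str(query_index)
  let st0 : PQState := ⟨'q' :: PySem.Int.toChars query_index, none, "item".toList, "combine".toList⟩
  let r := pqLoopA lines 0 st0 0
  let sql := PySem.Chars.strip (PySem.Chars.join "\n".toList (PySem.List.slice lines (some (r.2 : Int)) none))
  [("name", some (String.ofList r.1.name)),
   ("for_each", r.1.for_each.map String.ofList),
   ("item_alias", some (String.ofList r.1.item_alias)),
   ("for_mode", some (String.ofList r.1.for_mode)),
   ("sql", some (String.ofList sql)),
   ("raw", some raw_query)]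

-- ===== PORT B =====
-- port of Source B's _split_first_space: split at the first ' ' (rest = "" when absent)
def pqSplitFirstSpace : List Char → List Char × List Char
  | [] => ([], [])
  | c :: cs =>
    if c = ' ' then ([], cs)
    else
      let p := pqSplitFirstSpace cs
      (c :: p.1, p.2)

-- port of Source B's next(...): index of the first non-blank line not starting with "-- @",
-- defaulting to len(lines)
def pqBodyStart : List (List Char) → Nat
  | [] => 0
  | l :: rest =>
    let s := PySem.Chars.strip l
    if s ≠ [] ∧ ¬ PySem.Chars.startswith s "-- @".toList then 0 else pqBodyStart rest + 1

-- B's header-loop body: keyword dispatch on the first-space split of the directive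
def pqDirectiveB (line : List Char) (st : PQState) : PQState :=
  let p := pqSplitFirstSpace (PySem.Chars.strip (PySem.Chars.slice (PySem.Chars.strip line) (some 4) none))
  let value := PySem.Chars.strip p.2
  if p.1 = "name".toList then
    if value ≠ [] then { st with name := value } else st
  else if p.1 = "for_each".toList then
    if value ≠ [] then { st with for_each := some value } else st
  else if p.1 = "item".toList then
    if value ≠ [] then { st with item_alias := value } else st
  else if p.1 = "for_mode".toList then
    let low := PySem.Chars.lower value
    if low = "combine".toList ∨ low = "split".toList then { st with for_mode := low } else st
  else st

def parse_query_block_alt (raw_query : String) (query_index : Int) : List (String × Option String) :=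
  let lines := PySem.Chars.splitlines raw_query.toList
  let bs := pqBodyStart lines
  let st0 : PQState := ⟨'q' :: PySem.Int.toChars query_index, none, "item".toList, "combine".toList⟩
  let st := (PySem.List.slice lines none (some (bs : Int))).foldl (fun st l => pqDirectiveB l st) st0
  let sql := PySem.Chars.strip (PySem.Chars.join "\n".toList (PySem.List.slice lines (some (bs : Int)) none))
  [("name", some (String.ofList st.name)),
   ("for_each", st.for_each.map String.ofList),
   ("item_alias", some (String.ofList st.item_alias)),
   ("for_mode", some (String.ofList st.for_mode)),
   ("sql", some (String.ofList sql)),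
   ("raw", some raw_query)]

-- ===== PRECONDITION & SPEC =====
def Spec_parse_query_block (raw_query : String) (query_index : Int) (out : List (String × Option String)) : Prop := out = parse_query_block_alt raw_query query_index
instance (raw_query : String) (query_index : Int) (out : List (String × Option String)) : Decidable (Spec_parse_query_block raw_query query_index out) := by unfold Spec_parse_query_block; infer_instance

-- ===== CLAIM (what is proved, stated in full; the proofs are below) =====
def Claim_equal_parse_query_block : Prop := ∀ (raw_query : String) (query_index : Int), Dom_parse_query_block raw_query query_index → Spec_parse_query_block raw_query query_index (parse_query_block raw_query query_index)

-- ===== LEMMAS AND PROOFS =====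

-- splitting a space-free word glued by ' ' recovers exactly that word and rest
lemma pqSfs_append (w t : List Char) (hw : ' ' ∉ w) :
    pqSplitFirstSpace (w ++ ' ' :: t) = (w, t) := by
  induction w with
  | nil => simp [pqSplitFirstSpace]
  | cons c cs ih =>
    have hc : c ≠ ' ' := by intro h; exact hw (by simp [h])
    simp only [List.cons_append, pqSplitFirstSpace, if_neg hc,
      ih (fun h => hw (List.mem_cons_of_mem _ h))]

-- the key is space-free, and the input is either space-free (rest = []) or key ++ ' ' :: rest
lemma pqSfs_recover (d : List Char) :
    ' ' ∉ (pqSplitFirstSpace d).1 ∧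
      ((' ' ∉ d ∧ pqSplitFirstSpace d = (d, [])) ∨
        d = (pqSplitFirstSpace d).1 ++ ' ' :: (pqSplitFirstSpace d).2) := by
  induction d with
  | nil => simp [pqSplitFirstSpace]
  | cons c cs ih =>
    by_cases hc : c = ' '
    · subst hc; exact ⟨by simp [pqSplitFirstSpace], Or.inr (by simp [pqSplitFirstSpace])⟩
    · obtain ⟨ih1, ih2⟩ := ih
      refine ⟨?_, ?_⟩
      · simp only [pqSplitFirstSpace, if_neg hc]
        intro h
        rcases List.mem_cons.mp h with h | h
        · exact hc h.symm
        · exact ih1 h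
      · rcases ih2 with ⟨h1, h2⟩ | h2
        · refine Or.inl ⟨?_, by simp [pqSplitFirstSpace, if_neg hc, h2]⟩
          intro h
          rcases List.mem_cons.mp h with h | h
          · exact hc h.symm
          · exact h1 h
        · refine Or.inr ?_
          simp only [pqSplitFirstSpace, if_neg hc]
          simpa using h2

lemma pq_startswith_false_of_no_space (d w : List Char) (hd : ' ' ∉ d) (hw : ' ' ∈ w) :
    PySem.Chars.startswith d w = false := by
  rw [Bool.eq_false_iff]
  intro h
  obtain ⟨t, ht⟩ := (PySem.Chars.startswith_iff d w).mp h
  exact hd (ht ▸ List.mem_append_left t hw)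

lemma pq_startswith_false_of_key_ne (d w : List Char) (hw : ' ' ∉ w)
    (hne : (pqSplitFirstSpace d).1 ≠ w) :
    PySem.Chars.startswith d (w ++ [' ']) = false := by
  rw [Bool.eq_false_iff]
  intro h
  obtain ⟨t, ht⟩ := (PySem.Chars.startswith_iff d (w ++ [' '])).mp h
  have hd : d = w ++ ' ' :: t := by rw [← ht, List.append_assoc]; rfl
  exact hne (by rw [hd, pqSfs_append w t hw])

-- core fact: A's fixed-width-prefix dispatch equals B's first-space-split dispatch
lemma pqDirective_eq (l : List Char) (st : PQState) :
    pqDirectiveB l st = pqDirectiveA (PySem.Chars.strip l) st := by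
  have h5 : ∀ xs : List Char, PySem.List.slice xs (some (5 : Int)) none = List.drop 5 xs :=
    fun xs => by exact_mod_cast PySem.List.slice_from_natCast xs 5
  have h9 : ∀ xs : List Char, PySem.List.slice xs (some (9 : Int)) none = List.drop 9 xs :=
    fun xs => by exact_mod_cast PySem.List.slice_from_natCast xs 9
  simp only [pqDirectiveA, pqDirectiveB]
  generalize PySem.Chars.strip (PySem.Chars.slice (PySem.Chars.strip l) (some 4) none) = d
  obtain ⟨hk, hcase⟩ := pqSfs_recover d
  rcases hcase with ⟨hd, hsp⟩ | hd
  · -- no space in d: rest is [], every A-prefix test is false, every B-branch is a no-op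
    have f1 := pq_startswith_false_of_no_space d "name ".toList hd (by decide)
    have f2 := pq_startswith_false_of_no_space d "for_each ".toList hd (by decide)
    have f3 := pq_startswith_false_of_no_space d "item ".toList hd (by decide)
    have f4 := pq_startswith_false_of_no_space d "for_mode ".toList hd (by decide)
    simp at f1 f2 f3 f4
    have hv : PySem.Chars.strip ([] : List Char) = [] := by decide
    have hl : PySem.Chars.lower ([] : List Char) = [] := by decide
    simp [hsp, f1, f2, f3, f4, hv, hl]
  · rcases hsfs : pqSplitFirstSpace d with ⟨k, r⟩
    rw [hsfs] at hd hk
    simp only [] at hd hk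
    subst hd
    by_cases e1 : k = "name".toList
    · subst e1
      simp [PySem.Chars.startswith, h5]
    · by_cases e2 : k = "for_each".toList
      · subst e2
        simp [PySem.Chars.startswith, h9]
      · by_cases e3 : k = "item".toList
        · subst e3
          simp [PySem.Chars.startswith, h5]
        · by_cases e4 : k = "for_mode".toList
          · subst e4
            simp [PySem.Chars.startswith, h9]
          · have f1 := pq_startswith_false_of_key_ne _ "name".toList (by decide) (by rw [hsfs]; exact e1)
            have f2 := pq_startswith_false_of_key_ne _ "for_each".toList (by decide) (by rw [hsfs]; exact e2)
            have f3 := pq_startswith_false_of_key_ne _ "item".toList (by decide) (by rw [hsfs]; exact e3)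
            have f4 := pq_startswith_false_of_key_ne _ "for_mode".toList (by decide) (by rw [hsfs]; exact e4)
            simp at e1 e2 e3 e4 f1 f2 f3 f4
            simp [e1, e2, e3, e4, f1, f2, f3, f4]

-- a blank line is a no-op for B's header step
lemma pqDirectiveB_blank (l : List Char) (st : PQState) (h : PySem.Chars.strip l = []) :
    pqDirectiveB l st = st := by
  rw [pqDirective_eq, h]
  have z4 : PySem.List.slice ([] : List Char) (some 4) none = ([] : List Char) := by decide
  have zs : PySem.Chars.strip ([] : List Char) = [] := by decide
  simp [pqDirectiveA, PySem.Chars.startswith, z4, zs]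

-- A's whole loop computed by B's decomposition: fold over the header prefix + boundary index
lemma pqLoopA_eq (lines : List (List Char)) (idx : Nat) (st : PQState) (bs : Nat) :
    pqLoopA lines idx st bs =
      ((lines.take (pqBodyStart lines)).foldl (fun st l => pqDirectiveB l st) st,
        if lines = [] then bs else idx + pqBodyStart lines) := by
  induction lines generalizing idx st bs with
  | nil => simp [pqLoopA, pqBodyStart]
  | cons l rest ih =>
    simp only [pqLoopA, pqBodyStart]
    by_cases h1 : PySem.Chars.strip l = []
    · rw [if_pos h1, ih]
      have hc : ¬(PySem.Chars.strip l ≠ [] ∧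
          ¬PySem.Chars.startswith (PySem.Chars.strip l) "-- @".toList = true) := by simp [h1]
      rw [if_neg hc]
      have hB := pqDirectiveB_blank l st h1
      cases rest with
      | nil => simp [pqBodyStart, hB]
      | cons a as => simp [hB]; omega
    · by_cases h2 : PySem.Chars.startswith (PySem.Chars.strip l) "-- @".toList = true
      · rw [if_neg h1, if_neg (by simpa using h2), ih]
        have hc : ¬(PySem.Chars.strip l ≠ [] ∧
            ¬PySem.Chars.startswith (PySem.Chars.strip l) "-- @".toList = true) := by
          intro hc; exact hc.2 h2
        rw [if_neg hc]
        have hB : pqDirectiveB l st = pqDirectiveA (PySem.Chars.strip l) st := pqDirective_eq l st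
        cases rest with
        | nil => simp [pqBodyStart, hB]
        | cons a as => simp [hB]; omega
      · rw [if_neg h1, if_pos (by simpa using h2)]
        have hc : PySem.Chars.strip l ≠ [] ∧
            ¬PySem.Chars.startswith (PySem.Chars.strip l) "-- @".toList = true := ⟨h1, h2⟩
        rw [if_pos hc]
        simp

-- ===== VERDICT (by name: the statement is the Claim_ definition above) =====
theorem parse_query_block_spec : Claim_equal_parse_query_block := by
  intro raw_query query_index _
  unfold Spec_parse_query_block parse_query_block parse_query_block_alt
  simp only []
  rw [pqLoopA_eq]
  have hbs : (if PySem.Chars.splitlines raw_query.toList = [] then 0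
      else 0 + pqBodyStart (PySem.Chars.splitlines raw_query.toList)) =
      pqBodyStart (PySem.Chars.splitlines raw_query.toList) := by
    cases PySem.Chars.splitlines raw_query.toList <;> simp [pqBodyStart]
  rw [hbs]
  rw [show ∀ xs : List (List Char), PySem.List.slice xs none (some (pqBodyStart xs : Int)) =
      List.take (pqBodyStart xs) xs from fun xs => PySem.List.slice_to_natCast xs _]
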